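-- pv_equiv track=rewrite | github.com/nanoporetech/fast5_research | fast5_research/util.py | kmer_overlap_gen
-- ===== SOURCE A (Python) =====
-- from itertools import tee
--
-- def kmer_overlap_gen(kmers, moves=None):
--     """From a list of kmers return the character shifts between them.
--     (Movement from i to i+1 entry, e.g. [AATC,ATCG] returns [0,1]).
--     Allowed moves may be specified in moves argument in order of preference.
--     Taken from dragonet.bio.seq_tools
--
--     :param kmers: sequence of kmer strings.
--     :param moves: allowed movements, if None all movements to length of kmer
--         are allowed.
--     """
--
--     first = True
--     yield 0
--     for last_kmer, this_kmer in window(kmers, 2):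
--         if first:
--             if moves is None:
--                 l = len(this_kmer)
--                 moves = range(l + 1)
--             first = False
--
--         l = len(this_kmer)
--         for j in moves:
--             if j < 0:
--                 if last_kmer[:j] == this_kmer[-j:]:
--                     yield j
--                     break
--             elif j > 0 and j < l:
--                 if last_kmer[j:l] == this_kmer[0:-j]:
--                     yield j
--                     break
--             elif j == 0:
--                 if last_kmer == this_kmer:
--                     yield 0
--                     break
--             else:
--                 yield l
--                 break
--
-- def window(iterable, size):
--     """Create an iterator returning a sliding window from another iterator
--
--     :param iterable: Iterator
--     :param size: Size of window
--
--     :returns: an iterator returning a tuple containing the data in the window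
--
--     """
--     assert size > 0, "Window size for iterator should be strictly positive, got {0}".format(size)
--     iters = tee(iterable, size)
--     for i in range(1, size):
--         for each in iters[i:]:
--             next(each, None)
--     return list(zip(*iters))
-- ===== SOURCE B (Python) =====
-- def kmer_overlap_gen(kmers, moves=None):
--     """Character shifts between consecutive kmers (list form of A's generator).
--
--     Resolves the default move preference up front, precomputes the set of
--     valid in-range shifts per pair once, then takes the first preferred move
--     with an O(1) membership test instead of a slice comparison per move.
--     """
--     if moves is None:
--         mv = list(range(len(kmers[1]) + 1)) if len(kmers) > 1 else []
--     else:
--         mv = list(moves)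
--     out = [0]
--     for prev, this in zip(kmers, kmers[1:]):
--         l = len(this)
--         ok = {j for j in range(1, l) if prev[j:l] == this[:l - j]}
--
--         def sat(j):
--             if j < 0:
--                 return prev[:j] == this[-j:]
--             if j == 0:
--                 return prev == this
--             if j < l:
--                 return j in ok
--             return True
--
--         j = next(filter(sat, mv), None)
--         if j is not None:
--             out.append(l if j >= l else j)
--     return out
-- ===== Notes on version B (the rewrite author's own statement) =====
-- stated objective: alternative
-- what changed: B replaces A's generator/window machinery and per-move slice comparisons by an upfront resolution of the default move list, a precomputed set of valid in-range shifts per pair, and a single find-first over the moves with O(1) membership tests; per pair this is O(k^2 + |moves|) instead of A's O(|moves|*k).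
import Mathlib
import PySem

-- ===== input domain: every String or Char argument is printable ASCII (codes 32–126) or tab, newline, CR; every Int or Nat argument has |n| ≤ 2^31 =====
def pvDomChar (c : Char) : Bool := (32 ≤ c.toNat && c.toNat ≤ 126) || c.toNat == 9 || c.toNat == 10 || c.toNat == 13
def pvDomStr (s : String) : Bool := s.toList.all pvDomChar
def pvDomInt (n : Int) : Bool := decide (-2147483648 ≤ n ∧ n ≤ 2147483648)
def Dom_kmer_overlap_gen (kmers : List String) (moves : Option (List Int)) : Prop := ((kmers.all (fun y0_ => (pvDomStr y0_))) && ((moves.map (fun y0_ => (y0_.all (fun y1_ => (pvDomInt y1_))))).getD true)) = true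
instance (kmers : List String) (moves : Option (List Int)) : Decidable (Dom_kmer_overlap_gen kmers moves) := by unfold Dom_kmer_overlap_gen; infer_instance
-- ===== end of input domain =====

-- B resolves the default move list up front, precomputes the set of valid in-range shifts
-- per pair once, and picks the first preferred move by a find-first with membership tests,
-- instead of A's generator/window machinery with a slice comparison per tried move.

-- ===== PORT A =====
-- inner 'for j in moves: … yield …; break' of A: first yielded value, if any
def pvAInner (moves : List Int) (last this : List Char) (l : Int) : Option Int :=
  match moves with
  | [] => none
  | j :: rest =>
    if j < 0 then
      if PySem.List.slice last none (some j) = PySem.List.slice this (some (-j)) none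
      then some j else pvAInner rest last this l
    else if 0 < j ∧ j < l then
      if PySem.List.slice last (some j) (some l) = PySem.List.slice this (some 0) (some (-j))
      then some j else pvAInner rest last this l
    else if j = 0 then
      if last = this then some 0 else pvAInner rest last this l
    else some l

-- A's main loop over window(kmers, 2) (for a list, window(xs, 2) = list(zip(xs, xs[1:]))),
-- threading the 'first'/'moves' state exactly as the Python does
def pvALoop (pairs : List (List Char × List Char)) (first : Bool) (movesSt : Option (List Int)) : List Int :=
  match pairs with
  | [] => []
  | (last, this) :: rest =>
    let mv : Option (List Int) :=
      if first then
        match movesSt with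
        | none => some (PySem.List.pyRange 0 ((this.length : Int) + 1) 1)
        | some m => some m
      else movesSt
    match pvAInner (mv.getD []) last this (this.length : Int) with
    | some y => y :: pvALoop rest false mv
    | none => pvALoop rest false mv

-- strings are handled on their code points (PySem.Chars level)
def kmer_overlap_gen (kmers : List String) (moves : Option (List Int)) : List Int :=
  let ks := kmers.map String.toList
  0 :: pvALoop (ks.zip (ks.drop 1)) true moves

-- ===== PORT B =====
-- ok = {j for j in range(1, l) if prev[j:l] == this[:l-j]}
def pvOk (prev this : List Char) (l : Int) : PySem.Set Int :=
  PySem.Set.ofList ((PySem.List.pyRange 1 l 1).filter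
    (fun j => decide (PySem.List.slice prev (some j) (some l) = PySem.List.slice this none (some (l - j)))))

-- def sat(j): …
def pvSat (prev this : List Char) (l : Int) (ok : PySem.Set Int) (j : Int) : Bool :=
  if j < 0 then decide (PySem.List.slice prev none (some j) = PySem.List.slice this (some (-j)) none)
  else if j = 0 then decide (prev = this)
  else if j < l then PySem.Set.contains ok j
  else true

-- one pair: j = next(filter(sat, mv), None); if j is not None: append(l if j >= l else j)
def pvBStep (mv : List Int) (prev this : List Char) : List Int :=
  let l : Int := (this.length : Int)
  let ok := pvOk prev this l
  match mv.find? (pvSat prev this l ok) with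
  | some j => [if l ≤ j then l else j]
  | none => []

def kmer_overlap_gen_alt (kmers : List String) (moves : Option (List Int)) : List Int :=
  let ks := kmers.map String.toList
  let mv : List Int :=
    match moves with
    | some m => m
    | none =>
      match ks with
      | _ :: s :: _ => PySem.List.pyRange 0 ((s.length : Int) + 1) 1
      | _ => []
  0 :: (ks.zip (ks.drop 1)).foldl (fun acc p => acc ++ pvBStep mv p.1 p.2) []

-- ===== PRECONDITION & SPEC =====
def Spec_kmer_overlap_gen (kmers : List String) (moves : Option (List Int)) (out : List Int) : Prop := out = kmer_overlap_gen_alt kmers moves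
instance (kmers : List String) (moves : Option (List Int)) (out : List Int) : Decidable (Spec_kmer_overlap_gen kmers moves out) := by unfold Spec_kmer_overlap_gen; infer_instance

-- ===== CLAIM (what is proved, stated in full; the proofs are below) =====
def Claim_equal_kmer_overlap_gen : Prop := ∀ (kmers : List String) (moves : Option (List Int)), Dom_kmer_overlap_gen kmers moves → Spec_kmer_overlap_gen kmers moves (kmer_overlap_gen kmers moves)

-- ===== LEMMAS AND PROOFS =====

-- this[0:-j] is this[:l-j] when 0 < j < l = len(this)
lemma pv_slice_norm (this : List Char) (j : Int) (h0 : 0 < j) (hl : j < (this.length : Int)) :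
    PySem.List.slice this none (some (-j)) =
    PySem.List.slice this none (some ((this.length : Int) - j)) := by
  have hj : j = ((j.toNat : Nat) : Int) := (Int.toNat_of_nonneg h0.le).symm
  rw [hj, PySem.List.slice_to_neg_natCast _ _ (by omega), PySem.List.slice_to _ (by omega)]
  congr 1
  omega

-- for 0 < j < l (l = length of `this`), A's slice test and membership in B's precomputed set agree
lemma pv_ok_mem (prev this : List Char) (j : Int) (h0 : 0 < j) (hl : j < (this.length : Int)) :
    PySem.Set.contains (pvOk prev this (this.length : Int)) j =
      decide (PySem.List.slice prev (some j) (some (this.length : Int)) =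
              PySem.List.slice this none (some (-j))) := by
  have key : j ∈ pvOk prev this (this.length : Int) ↔
      PySem.List.slice prev (some j) (some (this.length : Int)) =
      PySem.List.slice this none (some (-j)) := by
    unfold pvOk
    rw [PySem.Set.mem_ofList, List.mem_filter, ← pv_slice_norm this j h0 hl]
    simp only [PySem.List.mem_pyRange_one, decide_eq_true_iff]
    constructor
    · exact fun h => h.2
    · exact fun h => ⟨⟨by omega, hl⟩, h⟩
  rw [Bool.eq_iff_iff]
  simp only [PySem.Set.contains]
  rw [List.contains_iff_mem, decide_eq_true_iff]
  exact key

-- the per-pair value: A's inner move scan = B's find-first, mapped through 'l if j >= l else j'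
lemma pv_inner_eq (mv : List Int) (prev this : List Char) :
    pvAInner mv prev this (this.length : Int) =
      (mv.find? (pvSat prev this (this.length : Int) (pvOk prev this (this.length : Int)))).map
        (fun j => if (this.length : Int) ≤ j then (this.length : Int) else j) := by
  induction mv with
  | nil => rfl
  | cons j rest ih =>
    have hL0 : (0:Int) ≤ (this.length : Int) := Int.natCast_nonneg _
    rw [List.find?_cons]
    by_cases hneg : j < 0
    · rw [show pvSat prev this (this.length : Int) (pvOk prev this (this.length : Int)) j =
          decide (PySem.List.slice prev none (some j) = PySem.List.slice this (some (-j)) none)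
        from by simp [pvSat, hneg]]
      by_cases hc : PySem.List.slice prev none (some j) = PySem.List.slice this (some (-j)) none
      · simp [pvAInner, hneg, hc, show ¬ (this.length : Int) ≤ j by omega]
      · simp [pvAInner, hneg, hc, ih]
    · by_cases h0 : j = 0
      · subst h0
        rw [show pvSat prev this (this.length : Int) (pvOk prev this (this.length : Int)) 0 =
            decide (prev = this) from by simp [pvSat]]
        by_cases hc : prev = this
        · simp only [hc, decide_true]
          simp [pvAInner]
          intro h
          subst h
          simp
        · simp [pvAInner, hc, ih]
      · have hpos : 0 < j := by omega
        by_cases hlt : j < (this.length : Int)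
        · rw [show pvSat prev this (this.length : Int) (pvOk prev this (this.length : Int)) j =
              PySem.Set.contains (pvOk prev this (this.length : Int)) j
            from by simp [pvSat, hneg, h0, hlt],
            pv_ok_mem prev this j hpos hlt]
          by_cases hc : PySem.List.slice prev (some j) (some (this.length : Int)) =
              PySem.List.slice this none (some (-j))
          · simp [pvAInner, hneg, hpos, hlt, hc, show ¬ (this.length : Int) ≤ j by omega]
          · simp [pvAInner, hneg, hpos, hlt, hc, ih]
        · rw [show pvSat prev this (this.length : Int) (pvOk prev this (this.length : Int)) j =
              true from by simp [pvSat, hneg, h0, hlt]]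
          simp [pvAInner, hneg, h0, hlt, show (this.length : Int) ≤ j by omega]

-- once the moves state is resolved, A's loop is the concatenation of B's per-pair steps
lemma pv_loop_eq (pairs : List (List Char × List Char)) (mv : List Int) :
    pvALoop pairs false (some mv) = pairs.flatMap (fun p => pvBStep mv p.1 p.2) := by
  induction pairs with
  | nil => rfl
  | cons p rest ih =>
    obtain ⟨a, b⟩ := p
    simp only [pvALoop, Bool.false_eq_true, if_false, Option.getD_some, List.flatMap_cons]
    rw [pv_inner_eq mv a b]
    cases hf : (mv.find? (pvSat a b (b.length : Int) (pvOk a b (b.length : Int)))) with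
    | none => simp [pvBStep, hf, ih]
    | some j => simp [pvBStep, hf, ih]

-- on a nonempty pair list the 'first' flag only resolves the state, which is already 'some'
lemma pv_loop_first (pairs : List (List Char × List Char)) (mv : List Int) :
    pvALoop pairs true (some mv) = pvALoop pairs false (some mv) := by
  cases pairs with
  | nil => rfl
  | cons p rest => obtain ⟨a, b⟩ := p; simp [pvALoop]

-- the whole function, over an arbitrary code-point list
lemma pv_main (ks : List (List Char)) (moves : Option (List Int)) :
    pvALoop (ks.zip (ks.drop 1)) true moves =
      (ks.zip (ks.drop 1)).foldl
        (fun acc p => acc ++ pvBStep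
          (match moves with
           | some m => m
           | none => match ks with
             | _ :: s :: _ => PySem.List.pyRange 0 ((s.length : Int) + 1) 1
             | _ => []) p.1 p.2) [] := by
  match ks with
  | [] => rfl
  | [a] => rfl
  | a :: b :: t =>
    have hzip : (a :: b :: t).zip ((a :: b :: t).drop 1) = (a, b) :: ((b :: t).zip t) := rfl
    cases moves with
    | some m =>
      rw [hzip, pv_loop_first, pv_loop_eq, PySem.List.foldl_append_eq_flatMap]
      rfl
    | none =>
      have h1 : pvALoop ((a, b) :: ((b :: t).zip t)) true none
          = pvALoop ((a, b) :: ((b :: t).zip t)) false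
              (some (PySem.List.pyRange 0 ((b.length : Int) + 1) 1)) := by
        simp [pvALoop]
      rw [hzip, h1, pv_loop_eq, PySem.List.foldl_append_eq_flatMap]
      rfl

-- ===== VERDICT (by name: the statement is the Claim_ definition above) =====
theorem kmer_overlap_gen_spec : Claim_equal_kmer_overlap_gen := by
  intro kmers moves _
  unfold Spec_kmer_overlap_gen kmer_overlap_gen kmer_overlap_gen_alt
  simp only []
  rw [pv_main (kmers.map String.toList) moves]
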